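-- pv_equiv track=rewrite | github.com/MrBrantCode/unitest_baseline | mut_generate/mist_train_cf/cf_56772/solution.py | solar_dist
-- ===== SOURCE A (Python) =====
-- def solar_dist(planet1, planet2):
--     def check_validity(planet):
--         return planet in ["Mercury", "Venus", "Earth", "Mars", "Jupiter","Saturn", "Uranus", "Neptune"]
--
--     solar_distance = {
--         "Mercury": 1,
--         "Venus": 2,
--         "Earth": 3,
--         "Mars": 4,
--         "Jupiter": 5,
--         "Saturn": 6,
--         "Uranus": 7,
--         "Neptune": 8
--     }
--
--     if check_validity(planet1) and check_validity(planet2):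
--         distance1 = solar_distance.get(planet1)
--         distance2 = solar_distance.get(planet2)
--
--         closer_planets = [planet for planet in solar_distance if solar_distance[planet] < max(distance1, distance2)]
--         return tuple(closer_planets)
--     else:
--         return ()
-- ===== SOURCE B (Python) =====
-- def solar_dist(planet1, planet2):
--     # Single pass over the ordered planets with an accumulator:
--     # snapshot the prefix seen so far each time one of the two targets is
--     # encountered; the last snapshot (farther planet) is the answer.
--     prefix = []
--     result = []
--     seen1 = seen2 = False
--     for p in ("Mercury", "Venus", "Earth", "Mars",
--               "Jupiter", "Saturn", "Uranus", "Neptune"):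
--         if p == planet1:
--             seen1 = True
--             result = list(prefix)
--         if p == planet2:
--             seen2 = True
--             result = list(prefix)
--         prefix.append(p)
--     if not (seen1 and seen2):
--         return ()
--     return tuple(result)
-- ===== Notes on version B (the rewrite author's own statement) =====
-- stated objective: alternative
-- what changed: B replaces A's dict of distances plus filter-by-comparison with a single left-to-right pass over the ordered planet tuple that keeps a running prefix accumulator and snapshots it whenever either target planet is encountered; the validity check disappears into the seen-flags of the same pass.
import Mathlib
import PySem

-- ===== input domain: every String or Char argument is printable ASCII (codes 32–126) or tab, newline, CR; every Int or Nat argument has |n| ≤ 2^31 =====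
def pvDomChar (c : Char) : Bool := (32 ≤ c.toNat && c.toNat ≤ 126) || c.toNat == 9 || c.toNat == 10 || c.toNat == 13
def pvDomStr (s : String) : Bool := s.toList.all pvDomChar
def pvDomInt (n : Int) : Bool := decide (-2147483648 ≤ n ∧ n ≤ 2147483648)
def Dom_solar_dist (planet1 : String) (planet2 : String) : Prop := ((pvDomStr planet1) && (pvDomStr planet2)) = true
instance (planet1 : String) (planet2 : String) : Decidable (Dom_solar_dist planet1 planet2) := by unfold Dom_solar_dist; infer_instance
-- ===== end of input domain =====

-- B replaces A's distance dict + filter with one left-to-right pass over the ordered planets,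
-- snapshotting a running prefix accumulator at each target planet (alternative decomposition).

-- ===== PORT A =====
-- the list literal in A's check_validity
def pvValidList : List String :=
  ["Mercury", "Venus", "Earth", "Mars", "Jupiter", "Saturn", "Uranus", "Neptune"]

def pvCheckValidity (planet : String) : Bool := pvValidList.contains planet

def pvSolarDistance : PySem.Dict String Int :=
  PySem.Dict.ofList [("Mercury", 1), ("Venus", 2), ("Earth", 3), ("Mars", 4),
    ("Jupiter", 5), ("Saturn", 6), ("Uranus", 7), ("Neptune", 8)]

def solar_dist (planet1 : String) (planet2 : String) : List String :=
  if pvCheckValidity planet1 && pvCheckValidity planet2 then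
    -- .get returns the stored int; inside this branch both lookups always succeed
    let distance1 : Int := (pvSolarDistance.get? planet1).getD 0
    let distance2 : Int := (pvSolarDistance.get? planet2).getD 0
    pvSolarDistance.keys.filter (fun planet => pvSolarDistance.getD planet 0 < max distance1 distance2)
  else []

-- ===== PORT B =====
-- loop state: (prefix accumulator, last snapshot, seen1, seen2)
def pvStep (planet1 planet2 : String)
    (s : List String × List String × Bool × Bool) (p : String) :
    List String × List String × Bool × Bool :=
  let s := if p == planet1 then (s.1, s.1, true, s.2.2.2) else s
  let s := if p == planet2 then (s.1, s.1, s.2.2.1, true) else s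
  (s.1 ++ [p], s.2.1, s.2.2.1, s.2.2.2)

def solar_dist_alt (planet1 : String) (planet2 : String) : List String :=
  let st := ["Mercury", "Venus", "Earth", "Mars", "Jupiter", "Saturn", "Uranus", "Neptune"].foldl
      (pvStep planet1 planet2) ([], [], false, false)
  if st.2.2.1 && st.2.2.2 then st.2.1 else []

-- ===== PRECONDITION & SPEC =====
def Spec_solar_dist (planet1 : String) (planet2 : String) (out : List String) : Prop := out = solar_dist_alt planet1 planet2
instance (planet1 : String) (planet2 : String) (out : List String) : Decidable (Spec_solar_dist planet1 planet2 out) := by unfold Spec_solar_dist; infer_instance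

-- ===== CLAIM =====
def Claim_equal_solar_dist : Prop := ∀ (planet1 : String) (planet2 : String), Dom_solar_dist planet1 planet2 → Spec_solar_dist planet1 planet2 (solar_dist planet1 planet2)

-- ===== LEMMAS AND PROOFS =====

lemma pv_mem_cases (p : String) (h : p ∈ pvValidList) :
    p = "Mercury" ∨ p = "Venus" ∨ p = "Earth" ∨ p = "Mars" ∨ p = "Jupiter" ∨
    p = "Saturn" ∨ p = "Uranus" ∨ p = "Neptune" := by
  simpa [pvValidList] using h

-- fold invariant: if planet1 never occurs in the remaining list, its seen-flag is unchanged
lemma pv_seen1 (p1 p2 : String) (l : List String)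
    (s : List String × List String × Bool × Bool) (h : p1 ∉ l) :
    (l.foldl (pvStep p1 p2) s).2.2.1 = s.2.2.1 := by
  induction l generalizing s with
  | nil => rfl
  | cons a t ih =>
    simp at h
    rw [List.foldl_cons, ih _ h.2]
    unfold pvStep
    have hb : (a == p1) = false := beq_eq_false_iff_ne.mpr (Ne.symm h.1)
    simp [hb]
    split <;> rfl

-- fold invariant: if planet2 never occurs in the remaining list, its seen-flag is unchanged
lemma pv_seen2 (p1 p2 : String) (l : List String)
    (s : List String × List String × Bool × Bool) (h : p2 ∉ l) :
    (l.foldl (pvStep p1 p2) s).2.2.2 = s.2.2.2 := by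
  induction l generalizing s with
  | nil => rfl
  | cons a t ih =>
    simp at h
    rw [List.foldl_cons, ih _ h.2]
    unfold pvStep
    have hb : (a == p2) = false := beq_eq_false_iff_ne.mpr (Ne.symm h.1)
    simp [hb]
    split <;> rfl

lemma pv_invalid_left (p q : String) (h : ¬ p ∈ pvValidList) :
    solar_dist p q = solar_dist_alt p q := by
  have h1 : ((["Mercury", "Venus", "Earth", "Mars", "Jupiter", "Saturn", "Uranus",
      "Neptune"] : List String).foldl (pvStep p q) ([], [], false, false)).2.2.1 = false :=
    pv_seen1 p q _ _ (by simpa [pvValidList] using h)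
  unfold solar_dist solar_dist_alt pvCheckValidity
  simp only [List.foldl_cons, List.foldl_nil] at h1
  simp [h1, h]

lemma pv_invalid_right (p q : String) (h : ¬ q ∈ pvValidList) :
    solar_dist p q = solar_dist_alt p q := by
  have h1 : ((["Mercury", "Venus", "Earth", "Mars", "Jupiter", "Saturn", "Uranus",
      "Neptune"] : List String).foldl (pvStep p q) ([], [], false, false)).2.2.2 = false :=
    pv_seen2 p q _ _ (by simpa [pvValidList] using h)
  unfold solar_dist solar_dist_alt pvCheckValidity
  simp only [List.foldl_cons, List.foldl_nil] at h1
  simp [h1, h]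

-- ===== VERDICT =====
theorem solar_dist_spec : Claim_equal_solar_dist := by
  intro p q _
  unfold Spec_solar_dist
  by_cases h1 : p ∈ pvValidList
  · by_cases h2 : q ∈ pvValidList
    · rcases pv_mem_cases p h1 with h | h | h | h | h | h | h | h <;> subst h <;>
        (rcases pv_mem_cases q h2 with h' | h' | h' | h' | h' | h' | h' | h' <;> subst h' <;> decide)
    · exact pv_invalid_right p q h2
  · exact pv_invalid_left p q h1
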